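-- pv_equiv track=rewrite | github.com/OlgaMotovitsa/Python | Seminars/Seminar7/task3.py | same_len_list
-- ===== SOURCE A (Python) =====
-- def same_len_list(list1, list2):         # 6 ✔   # 5 ✔
--     if len(list2) > len(list1):          # уравняли списки разной длины
--         temp = len(list1)               # в короткий список добавили элементы чтобы длины списков были равнры
--         for i in range(len(list2)):
--             if i > len(list1) - 1:
--                 list1.append(list1[i % temp])
--
--     elif len(list2) < len(list1):
--         temp = len(list2)
--         for i in range(len(list1)):
--             if i > len(list2) - 1:
--                 list2.append(list2[i % temp])
--
--     return list1, list2
-- ===== SOURCE B (Python) =====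
-- def same_len_list(list1, list2):
--     # Pad the shorter list cyclically by list repetition + slicing (in-place via extend).
--     if len(list2) > len(list1):
--         n, m = len(list1), len(list2)
--         reps = -(-m // n)
--         list1.extend((list1 * reps)[n:m])
--     elif len(list2) < len(list1):
--         n, m = len(list2), len(list1)
--         reps = -(-m // n)
--         list2.extend((list2 * reps)[n:m])
--     return list1, list2
-- ===== Notes on version B (the rewrite author's own statement) =====
-- stated objective: idiomatic
-- what changed: Replaces the index loop that appends one element per iteration guarded by a modular index with a single repeat-and-slice: compute ceil-division rep count, build short*reps and extend with its [n:m] slice.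
import Mathlib
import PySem

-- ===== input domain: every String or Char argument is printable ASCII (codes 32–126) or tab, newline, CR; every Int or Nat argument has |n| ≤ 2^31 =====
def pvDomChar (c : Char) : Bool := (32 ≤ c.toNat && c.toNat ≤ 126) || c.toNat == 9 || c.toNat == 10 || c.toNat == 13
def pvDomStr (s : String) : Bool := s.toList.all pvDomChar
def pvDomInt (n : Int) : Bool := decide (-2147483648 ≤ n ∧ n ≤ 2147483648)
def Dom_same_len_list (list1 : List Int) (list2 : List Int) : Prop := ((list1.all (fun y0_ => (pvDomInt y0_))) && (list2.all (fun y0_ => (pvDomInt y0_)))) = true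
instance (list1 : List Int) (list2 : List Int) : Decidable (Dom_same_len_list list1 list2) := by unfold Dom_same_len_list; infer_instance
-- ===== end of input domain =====

-- B pads the shorter list by repeat-and-slice instead of A's modular-index append loop; both mutate the
-- shorter Python list in place (same side effect); equivalence proved about the returned pair.

-- ===== PORT A =====
-- loop body: 'if i > len(list1) - 1: list1.append(list1[i % temp])' (len is of the CURRENT, growing list)
def pvStepA (temp : Int) (L : List Int) (i : Int) : List Int :=
  if i > (L.length : Int) - 1 then L ++ [PySem.List.pyGetD L (PySem.Int.mod i temp) 0] else L

def same_len_list (list1 : List Int) (list2 : List Int) : List Int × List Int :=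
  if (list2.length : Int) > (list1.length : Int) then
    ((PySem.List.pyRange 0 (list2.length : Int) 1).foldl (pvStepA (list1.length : Int)) list1, list2)
  else if (list2.length : Int) < (list1.length : Int) then
    (list1, (PySem.List.pyRange 0 (list1.length : Int) 1).foldl (pvStepA (list2.length : Int)) list2)
  else (list1, list2)

-- ===== PORT B =====
-- 'reps = -(-m // n); short.extend((short * reps)[n:m])'
def pvCycExt (short : List Int) (m : Int) : List Int :=
  short ++ PySem.List.slice
    ((List.replicate (-(PySem.Int.floordiv (-m) (short.length : Int))).toNat short).flatten)
    (some (short.length : Int)) (some m)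

def same_len_list_alt (list1 : List Int) (list2 : List Int) : List Int × List Int :=
  if (list2.length : Int) > (list1.length : Int) then
    (pvCycExt list1 (list2.length : Int), list2)
  else if (list2.length : Int) < (list1.length : Int) then
    (list1, pvCycExt list2 (list1.length : Int))
  else (list1, list2)

-- ===== PRECONDITION & SPEC =====
-- Pre_ excludes exactly the inputs where A raises ZeroDivisionError (i % 0): one list empty, the other not.
def Pre_same_len_list (list1 : List Int) (list2 : List Int) : Prop := (list1 = [] ↔ list2 = [])
instance (list1 : List Int) (list2 : List Int) : Decidable (Pre_same_len_list list1 list2) := by unfold Pre_same_len_list; infer_instance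

def pvWitness_same_len_list : List Int × List Int := ([1, 2], [5, 6, 7, 8, 9])

def Spec_same_len_list (list1 : List Int) (list2 : List Int) (out : List Int × List Int) : Prop := out = same_len_list_alt list1 list2
instance (list1 : List Int) (list2 : List Int) (out : List Int × List Int) : Decidable (Spec_same_len_list list1 list2 out) := by unfold Spec_same_len_list; infer_instance

-- ===== CLAIM (what is proved, stated in full; the proofs are below) =====
def Claim_equal_same_len_list : Prop := ∀ (list1 : List Int) (list2 : List Int), Dom_same_len_list list1 list2 → Pre_same_len_list list1 list2 → Spec_same_len_list list1 list2 (same_len_list list1 list2)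

-- ===== LEMMAS AND PROOFS =====

-- the canonical padding element
def pvPad (short : List Int) (k : Nat) : Int := short.getD (k % short.length) 0

theorem pvRangeMap (short : List Int) :
    (List.range short.length).map (pvPad short) = short := by
  apply List.ext_getElem
  · simp
  · intro i h1 h2
    simp only [List.getElem_map, List.getElem_range, pvPad]
    simp [Nat.mod_eq_of_lt h2, List.getD_eq_getElem?_getD, List.getElem?_eq_getElem h2]

-- A's loop computes the canonical cyclic padding
theorem pvLoopA_eq (short : List Int) (hn : 0 < short.length) (m : Nat) :
    (PySem.List.pyRange 0 (m : Int) 1).foldl (pvStepA (short.length : Int)) short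
      = short ++ (List.range' short.length (m - short.length)).map (pvPad short) := by
  induction m with
  | zero =>
    rw [PySem.List.pyRange_one_eq_nil (by omega)]
    simp
  | succ m ih =>
    have hcast : ((m + 1 : Nat) : Int) = (m : Int) + 1 := by push_cast; ring
    rw [hcast, PySem.List.pyRange_one_succ_right (by positivity), List.foldl_append, ih]
    simp only [List.foldl_cons, List.foldl_nil]
    set n := short.length with hndef
    unfold pvStepA
    by_cases hmn : n ≤ m
    · have hlenS : (short ++ (List.range' n (m - n)).map (pvPad short)).length = m := by
        simp [hndef]; omega
      rw [if_pos (by rw [hlenS]; omega)]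
      have hmod : PySem.Int.mod (m : Int) (n : Int) = ((m % n : Nat) : Int) :=
        PySem.Int.mod_natCast m n
      rw [hmod, PySem.List.pyGetD_natCast]
      have hlt : m % n < short.length := Nat.mod_lt _ hn
      rw [List.getD_append _ _ _ _ hlt]
      have hsub : m + 1 - n = (m - n) + 1 := by omega
      rw [hsub, List.range'_1_concat]
      have : n + (m - n) = m := by omega
      rw [this, List.map_append, List.map_cons, List.map_nil, List.append_assoc]
      rfl
    · have hz : m - n = 0 := by omega
      have hz1 : m + 1 - n = 0 := by omega
      rw [hz, hz1]
      simp only [List.range'_zero, List.map_nil, List.append_nil]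
      rw [if_neg (by simp; omega)]

-- the repeated list is the canonical cyclic sequence
theorem pvFlatten_eq (short : List Int) (r : Nat) :
    (List.replicate r short).flatten = (List.range (r * short.length)).map (pvPad short) := by
  induction r with
  | zero => simp
  | succ r ih =>
    have h : (r + 1) * short.length = short.length + r * short.length := by ring
    rw [List.replicate_succ, List.flatten_cons, ih, h, List.range_add, List.map_append,
        List.map_map]
    congr 1
    · exact (pvRangeMap short).symm
    · apply List.map_congr_left
      intro k _
      simp [pvPad, Nat.add_mod_left]

-- B computes the canonical cyclic padding
theorem pvCycExt_eq (short : List Int) (hn : 0 < short.length) (m : Nat) (hm : short.length ≤ m) :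
    pvCycExt short (m : Int) = short ++ (List.range' short.length (m - short.length)).map (pvPad short) := by
  unfold pvCycExt
  set n := short.length with hndef
  set reps : Int := -(PySem.Int.floordiv (-(m : Int)) (n : Int)) with hreps
  have hdm := PySem.Int.floordiv_mul_add_mod (-(m : Int)) (n : Int)
  have h0 : 0 ≤ PySem.Int.mod (-(m : Int)) (n : Int) :=
    PySem.Int.mod_nonneg (-(m : Int)) (by exact_mod_cast hn)
  have hmul : reps * (n : Int) = (m : Int) + PySem.Int.mod (-(m : Int)) (n : Int) := by
    rw [hreps]; linarith
  have hge : (m : Int) ≤ reps * (n : Int) := by linarith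
  have hrpos : 0 ≤ reps := by
    by_contra hneg
    push Not at hneg
    have : reps * (n : Int) ≤ 0 := by
      apply mul_nonpos_of_nonpos_of_nonneg (le_of_lt hneg) (by positivity)
    have : (0:Int) < m := by exact_mod_cast lt_of_lt_of_le hn hm
    omega
  have hcast : ((reps.toNat : Nat) : Int) = reps := Int.toNat_of_nonneg hrpos
  have hgeN : m ≤ reps.toNat * n := by
    have : ((reps.toNat * n : Nat) : Int) = reps * (n : Int) := by push_cast [hcast]; ring
    omega
  rw [pvFlatten_eq short reps.toNat, PySem.List.slice_natCast]
  congr 1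
  rw [← List.map_drop, ← List.map_take]
  congr 1
  have hdrop : (List.range (reps.toNat * n)).drop n = List.range' n (reps.toNat * n - n) := by
    simp [List.range_eq_range', List.drop_range']
  rw [hdrop, List.take_range'_of_length_ge (by omega)]

-- ===== VERDICT (by name: the statement is the Claim_ definition above) =====
theorem same_len_list_spec : Claim_equal_same_len_list := by
  intro l1 l2 _ hpre
  unfold Spec_same_len_list same_len_list same_len_list_alt
  split_ifs with h1 h2
  · have hne : l1 ≠ [] := by
      intro he
      have : l2 = [] := hpre.mp he
      simp [he, this] at h1
    have hn : 0 < l1.length := List.length_pos_of_ne_nil hne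
    rw [pvLoopA_eq l1 hn l2.length, pvCycExt_eq l1 hn l2.length (by exact_mod_cast le_of_lt h1)]
  · have hne : l2 ≠ [] := by
      intro he
      have : l1 = [] := hpre.mpr he
      simp [he, this] at h2
    have hn : 0 < l2.length := List.length_pos_of_ne_nil hne
    rw [pvLoopA_eq l2 hn l1.length, pvCycExt_eq l2 hn l1.length (by exact_mod_cast le_of_lt h2)]
  · rfl
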